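-- pv_equiv track=rewrite | github.com/viditpok/god-documents | cs3630/Project4/particle_filter/sensors.py | generate_centroid_pairs
-- ===== SOURCE A (Python) =====
-- from itertools import product
--
-- def generate_centroid_pairs(centroids_l, centroids_r):
--     centroid_pairs = []
--     while len(centroids_l) > 0 and len(centroids_r) > 0:
--         # 1. find the (particle marker,robot marker) pair with shortest grid distance
--         all_pairs = product(centroids_l, centroids_r, )
--         c_l, c_r = min(all_pairs, key=lambda p: (p[0][0] - p[1][0])**2 + (p[0][1] - p[1][1])**2)
--
--         # 2. add this pair to centroid_pairs and remove markers from corresponding lists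
--         if abs(c_l[1] - c_r[1])<20 and c_l[0] > c_r[0]:
--             centroid_pairs.append((c_l, c_r))
--         centroids_l.remove(c_l)
--         centroids_r.remove(c_r)
--         pass
--     return centroid_pairs
-- ===== SOURCE B (Python) =====
-- def generate_centroid_pairs(centroids_l, centroids_r):
--     # one pass: all pairwise squared distances, sorted once (tuple order, so ties in
--     # distance keep (i, j) order), then greedy pick skipping already-matched endpoints.
--     # Note: unlike the original, this does not empty the caller's lists.
--     cand = [((cl[0] - cr[0]) ** 2 + (cl[1] - cr[1]) ** 2, i, j)
--             for i, cl in enumerate(centroids_l)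
--             for j, cr in enumerate(centroids_r)]
--     cand.sort()
--     used_l, used_r = set(), set()
--     pairs = []
--     for _, i, j in cand:
--         if i not in used_l and j not in used_r:
--             used_l.add(i)
--             used_r.add(j)
--             cl, cr = centroids_l[i], centroids_r[j]
--             if abs(cl[1] - cr[1]) < 20 and cl[0] > cr[0]:
--                 pairs.append((cl, cr))
--     return pairs
-- ===== Notes on version B (the rewrite author's own statement) =====
-- stated objective: faster
-- what changed: A rescans the full cross-product of the remaining lists to find the closest pair on every loop iteration; B computes all pairwise squared distances once, sorts the (dist, i, j) triples once, and does a single greedy pass over them with used-index sets.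
import Mathlib
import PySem

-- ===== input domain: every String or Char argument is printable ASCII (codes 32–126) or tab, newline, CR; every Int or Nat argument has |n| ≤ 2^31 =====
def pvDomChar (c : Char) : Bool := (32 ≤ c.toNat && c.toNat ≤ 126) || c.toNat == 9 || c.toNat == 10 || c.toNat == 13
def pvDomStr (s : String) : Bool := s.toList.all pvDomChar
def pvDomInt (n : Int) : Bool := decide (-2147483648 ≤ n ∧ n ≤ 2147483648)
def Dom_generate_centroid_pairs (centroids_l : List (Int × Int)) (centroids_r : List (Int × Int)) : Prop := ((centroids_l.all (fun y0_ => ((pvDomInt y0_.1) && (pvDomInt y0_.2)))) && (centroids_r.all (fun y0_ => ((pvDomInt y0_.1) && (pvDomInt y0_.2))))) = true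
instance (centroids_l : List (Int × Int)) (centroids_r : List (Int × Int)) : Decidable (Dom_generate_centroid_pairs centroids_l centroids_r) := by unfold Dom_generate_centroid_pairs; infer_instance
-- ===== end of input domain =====

-- B replaces A's O(n^3) repeated min-over-remaining-pairs loop by one sorted pass over all
-- pairwise distances with used-index sets; equivalence is about the RETURN value only
-- (the Python A empties both argument lists in place, B leaves them untouched).

-- ===== PORT A =====

-- termination helper for A's while-loop: a successful remove() shortens the list
theorem pv_remove?_length {α : Type} [BEq α] [LawfulBEq α] {xs : List α} {v : α} {ys : List α}
    (h : PySem.List.remove? xs v = some ys) : ys.length < xs.length := by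
  have hv : v ∈ xs := by
    by_contra hv
    rw [(PySem.List.remove?_eq_none_iff xs v).mpr hv] at h
    simp at h
  rw [PySem.List.remove?_eq_some_erase xs v hv] at h
  cases h
  have := List.length_erase_of_mem hv
  have hpos : 0 < xs.length := List.length_pos_of_mem hv
  omega

-- the line `c_l, c_r = min(product(centroids_l, centroids_r), key=squared distance)`;
-- the .getD default is unreachable (the loop only calls it on nonempty lists)
def pvMinPair (centroids_l centroids_r : List (Int × Int)) : (Int × Int) × (Int × Int) :=
  (PySem.List.min? (centroids_l.flatMap (fun a => centroids_r.map (fun b => (a, b))))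
    (fun p => (p.1.1 - p.2.1) ^ 2 + (p.1.2 - p.2.2) ^ 2)).getD ((0, 0), (0, 0))

-- the while-loop of A: pick the distance-minimal pair of the remaining lists, maybe keep it,
-- remove both endpoints (the .getD [] defaults are unreachable: remove? of the member
-- returned by min succeeds), repeat until one list is empty
def pvLoopA (centroids_l centroids_r : List (Int × Int))
    (centroid_pairs : List ((Int × Int) × (Int × Int))) : List ((Int × Int) × (Int × Int)) :=
  if h : 0 < centroids_l.length ∧ 0 < centroids_r.length then
    -- c_l, c_r = min(...); conditional append; remove both; loop
    pvLoopA
      ((PySem.List.remove? centroids_l (pvMinPair centroids_l centroids_r).1).getD [])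
      ((PySem.List.remove? centroids_r (pvMinPair centroids_l centroids_r).2).getD [])
      (if |(pvMinPair centroids_l centroids_r).1.2 - (pvMinPair centroids_l centroids_r).2.2| < 20
          ∧ (pvMinPair centroids_l centroids_r).1.1 > (pvMinPair centroids_l centroids_r).2.1 then
        centroid_pairs ++ [pvMinPair centroids_l centroids_r]
       else centroid_pairs)
  else centroid_pairs
termination_by centroids_l.length
decreasing_by
  rcases hrem : PySem.List.remove? centroids_l (pvMinPair centroids_l centroids_r).1 with _ | l'
  · simpa using h.1
  · simpa using pv_remove?_length hrem

def generate_centroid_pairs (centroids_l : List (Int × Int)) (centroids_r : List (Int × Int)) :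
    List ((Int × Int) × (Int × Int)) :=
  pvLoopA centroids_l centroids_r []

-- ===== PORT B =====

def pvDist (cl cr : Int × Int) : Int := (cl.1 - cr.1) ^ 2 + (cl.2 - cr.2) ^ 2

-- the candidate list [(d, i, j), …] of Source B's comprehension
def pvCand (centroids_l centroids_r : List (Int × Int)) : List (Int × Int × Int) :=
  (PySem.List.enumerate centroids_l).flatMap (fun ic =>
    (PySem.List.enumerate centroids_r).map (fun jc => (pvDist ic.2 jc.2, ic.1, jc.1)))

-- Python's tuple comparison on (d, i, j) is the lexicographic order
def pvKey (t : Int × Int × Int) : Lex (Int × Lex (Int × Int)) := toLex (t.1, toLex (t.2.1, t.2.2))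

-- Source B's for-loop over the sorted candidates with the two used-index sets
-- (indices produced by enumerate are always in range, so pyGetD's default is never used)
def pvScanB (centroids_l centroids_r : List (Int × Int)) :
    List (Int × Int × Int) → PySem.Set Int → PySem.Set Int →
    List ((Int × Int) × (Int × Int)) → List ((Int × Int) × (Int × Int))
  | [], _, _, pairs => pairs
  | (_, i, j) :: rest, used_l, used_r, pairs =>
    if !(PySem.Set.contains used_l i) && !(PySem.Set.contains used_r j) then
      pvScanB centroids_l centroids_r rest (PySem.Set.add used_l i) (PySem.Set.add used_r j)
        (if |(PySem.List.pyGetD centroids_l i ((0 : Int), (0 : Int))).2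
              - (PySem.List.pyGetD centroids_r j ((0 : Int), (0 : Int))).2| < 20
            ∧ (PySem.List.pyGetD centroids_l i ((0 : Int), (0 : Int))).1
              > (PySem.List.pyGetD centroids_r j ((0 : Int), (0 : Int))).1 then
          pairs ++ [(PySem.List.pyGetD centroids_l i ((0 : Int), (0 : Int)),
                     PySem.List.pyGetD centroids_r j ((0 : Int), (0 : Int)))]
         else pairs)
    else pvScanB centroids_l centroids_r rest used_l used_r pairs

def generate_centroid_pairs_alt (centroids_l : List (Int × Int)) (centroids_r : List (Int × Int)) :
    List ((Int × Int) × (Int × Int)) :=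
  pvScanB centroids_l centroids_r
    (PySem.List.sorted (pvCand centroids_l centroids_r) pvKey)
    PySem.Set.empty PySem.Set.empty []

-- ===== PRECONDITION & SPEC =====
def Spec_generate_centroid_pairs (centroids_l : List (Int × Int)) (centroids_r : List (Int × Int)) (out : List ((Int × Int) × (Int × Int))) : Prop := out = generate_centroid_pairs_alt centroids_l centroids_r
instance (centroids_l : List (Int × Int)) (centroids_r : List (Int × Int)) (out : List ((Int × Int) × (Int × Int))) : Decidable (Spec_generate_centroid_pairs centroids_l centroids_r out) := by unfold Spec_generate_centroid_pairs; infer_instance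

-- ===== CLAIM (what is proved, stated in full; the proofs are below) =====
def Claim_equal_generate_centroid_pairs : Prop := ∀ (centroids_l : List (Int × Int)) (centroids_r : List (Int × Int)), Dom_generate_centroid_pairs centroids_l centroids_r → Spec_generate_centroid_pairs centroids_l centroids_r (generate_centroid_pairs centroids_l centroids_r)

-- ===== LEMMAS AND PROOFS =====

-- the remainder of xs (annotated with its original index, starting at s) once the
-- indices in u have been matched away; `.map (·.2)` of it is what A's lists hold
def pvEnumRem {α : Type} (xs : List α) (u : List Int) (s : Int) : List (Int × α) :=
  match xs with
  | [] => []
  | x :: t => if u.contains s then pvEnumRem t u (s + 1) else (s, x) :: pvEnumRem t u (s + 1)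

theorem pvEnumRem_nil_used {α : Type} (xs : List α) (s : Int) :
    (pvEnumRem xs [] s).map (·.2) = xs := by
  induction xs generalizing s with
  | nil => simp [pvEnumRem]
  | cons x t ih => simp [pvEnumRem, ih (s+1)]

theorem pvEnumRem_mem {α : Type} (u : List Int) (p : Int × α) (xs : List α) (s : Int) :
    p ∈ pvEnumRem xs u s ↔
      ∃ (k : Nat) (h : k < xs.length), p.1 = s + k ∧ p.2 = xs[k] ∧ u.contains (s + (k : Int)) = false := by
  induction xs generalizing s with
  | nil => simp [pvEnumRem]
  | cons x t ih =>
    by_cases hc : u.contains s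
    · rw [pvEnumRem, if_pos hc, ih (s + 1)]
      constructor
      · rintro ⟨k, hk, h1, h2, h3⟩
        refine ⟨k + 1, by simpa using hk, ?_, by simpa using h2, ?_⟩
        · push_cast; omega
        · have : s + ((k:Int) + 1) = s + 1 + k := by omega
          push_cast [this]
          exact h3
      · rintro ⟨k, hk, h1, h2, h3⟩
        cases k with
        | zero => simp at h3 hc; exact absurd hc h3
        | succ k =>
          refine ⟨k, by simp at hk; omega, ?_, by simpa using h2, ?_⟩
          · push_cast at h1; omega
          · have : s + 1 + (k:Int) = s + ((k:Int) + 1) := by omega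
            rw [this]
            push_cast at h3
            exact h3
    · rw [pvEnumRem, if_neg hc]
      simp only [List.mem_cons, ih (s + 1)]
      constructor
      · rintro (rfl | ⟨k, hk, h1, h2, h3⟩)
        · exact ⟨0, by simp, by simp, by simp, by simpa using hc⟩
        · refine ⟨k + 1, by simpa using hk, ?_, by simpa using h2, ?_⟩
          · push_cast; omega
          · have : s + ((k:Int) + 1) = s + 1 + k := by omega
            push_cast [this]
            exact h3
      · rintro ⟨k, hk, h1, h2, h3⟩
        cases k with
        | zero =>
          left
          obtain ⟨p1, p2⟩ := p
          simp at h1 h2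
          simp [h1, h2]
        | succ k =>
          right
          refine ⟨k, by simp at hk; omega, ?_, by simpa using h2, ?_⟩
          · push_cast at h1; omega
          · have : s + 1 + (k:Int) = s + ((k:Int) + 1) := by omega
            rw [this]
            push_cast at h3
            exact h3

theorem pvEnumRem_lb {α : Type} (u : List Int) (xs : List α) (s : Int) :
    ∀ p ∈ pvEnumRem xs u s, s ≤ p.1 := by
  induction xs generalizing s with
  | nil => simp [pvEnumRem]
  | cons x t ih =>
    intro p hp
    rw [pvEnumRem] at hp
    split at hp
    · have := ih (s+1) p hp; omega
    · rcases List.mem_cons.mp hp with rfl | hp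
      · simp
      · have := ih (s+1) p hp; omega

theorem pvEnumRem_pairwise {α : Type} (u : List Int) (xs : List α) (s : Int) :
    (pvEnumRem xs u s).Pairwise (fun p q => p.1 < q.1) := by
  induction xs generalizing s with
  | nil => simp [pvEnumRem]
  | cons x t ih =>
    rw [pvEnumRem]
    split
    · exact ih (s+1)
    · refine List.Pairwise.cons ?_ (ih (s+1))
      intro q hq
      have := pvEnumRem_lb u t (s+1) q hq
      simp; omega

theorem pvEnumRem_snoc {α : Type} (u : List Int) (i : Int) (xs : List α) (s : Int) :
    pvEnumRem xs (u ++ [i]) s = (pvEnumRem xs u s).filter (fun p => p.1 != i) := by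
  induction xs generalizing s with
  | nil => simp [pvEnumRem]
  | cons x t ih =>
    rw [pvEnumRem, pvEnumRem]
    split_ifs with h1 h2 h2
    · exact ih (s + 1)
    · have hsi : s = i := by
        simp at h1 h2
        tauto
      rw [ih (s + 1), List.filter_cons]
      simp [hsi]
    · exfalso
      simp at h1 h2
      exact h1.1 h2
    · rw [ih (s + 1), List.filter_cons]
      have hsi : s ≠ i := by
        simp at h1
        tauto
      simp [hsi]

-- min? characterisation: the first element whose key is strictly below everything
-- before it and at most everything after it wins the fold
def pvMinStep {α κ : Type} [LT κ] [DecidableLT κ] (key : α → κ) : Option α → α → Option α :=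
  fun acc x => match acc with
  | none => some x
  | some m => if key x < key m then some x else some m

theorem pv_min?_eq_foldl {α κ : Type} [LT κ] [DecidableLT κ] (key : α → κ) (xs : List α) :
    PySem.List.min? xs key = xs.foldl (pvMinStep key) none := rfl
theorem pv_min?_fold_mem {α κ : Type} [LinearOrder κ] (key : α → κ) :
    ∀ (xs : List α) (acc : Option α) (b : α),
      xs.foldl (pvMinStep key) acc = some b →
      b ∈ xs ∨ acc = some b := by
  intro xs
  induction xs with
  | nil => intro acc b h; right; exact h
  | cons x t ih =>
    intro acc b h
    simp only [List.foldl_cons] at h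
    rcases ih _ b h with hb | hb
    · left; exact List.mem_cons_of_mem _ hb
    · cases acc with
      | none => left; simp [pvMinStep] at hb; simp [hb]
      | some m =>
        by_cases hk : key x < key m
        · simp [pvMinStep, hk] at hb; left; simp [hb]
        · simp [pvMinStep, hk] at hb; right; rw [hb]

theorem pv_min?_fold_keep {α κ : Type} [LinearOrder κ] (key : α → κ) :
    ∀ (xs : List α) (m : α), (∀ y ∈ xs, key m ≤ key y) →
      xs.foldl (pvMinStep key) (some m) = some m := by
  intro xs
  induction xs with
  | nil => intro m _; rfl
  | cons x t ih =>
    intro m h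
    simp only [List.foldl_cons]
    have : ¬ key x < key m := not_lt.mpr (h x (by simp))
    simp only [pvMinStep, this, if_false]
    exact ih m (fun y hy => h y (List.mem_cons_of_mem _ hy))

theorem pv_min?_append {α κ : Type} [LinearOrder κ] (key : α → κ) (pre suf : List α) (m : α)
    (h1 : ∀ y ∈ pre, key m < key y) (h2 : ∀ y ∈ suf, key m ≤ key y) :
    PySem.List.min? (pre ++ m :: suf) key = some m := by
  rw [pv_min?_eq_foldl, List.foldl_append]
  rcases hpre : pre.foldl (pvMinStep key) none with _ | b
  · simp only [List.foldl_cons, pvMinStep]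
    exact pv_min?_fold_keep key suf m h2
  · have hb : b ∈ pre := by
      rcases pv_min?_fold_mem key pre none b hpre with h | h
      · exact h
      · simp at h
    simp only [List.foldl_cons, pvMinStep]
    have hlt : key m < key b := h1 b hb
    simp only [hlt, if_pos]
    exact pv_min?_fold_keep key suf m h2

theorem pv_remove_first {α : Type} [BEq α] [LawfulBEq α] (v : α) :
    ∀ (A B : List α), (∀ a ∈ A, a ≠ v) → PySem.List.remove? (A ++ v :: B) v = some (A ++ B) := by
  intro A
  induction A with
  | nil => intro B _; simp [PySem.List.remove?_cons_self]
  | cons a t ih =>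
    intro B h
    rw [List.cons_append, PySem.List.remove?_cons_of_ne _ (h a (by simp))]
    rw [ih B (fun x hx => h x (List.mem_cons_of_mem _ hx))]
    rfl

-- the minimum of a product list, split around the winning pair
theorem pv_min?_product {κ : Type} [LinearOrder κ]
    (LA LB RA RB : List (Int × Int)) (lv rv : Int × Int)
    (key : (Int × Int) × (Int × Int) → κ)
    (h1 : ∀ a ∈ LA, ∀ b ∈ RA ++ rv :: RB, key (lv, rv) < key (a, b))
    (h2 : ∀ b ∈ RA, key (lv, rv) < key (lv, b))
    (h3 : ∀ b ∈ RB, key (lv, rv) ≤ key (lv, b))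
    (h4 : ∀ a ∈ LB, ∀ b ∈ RA ++ rv :: RB, key (lv, rv) ≤ key (a, b)) :
    PySem.List.min?
      ((LA ++ lv :: LB).flatMap (fun a => (RA ++ rv :: RB).map (fun b => (a, b)))) key
      = some (lv, rv) := by
  rw [List.flatMap_append, List.flatMap_cons, List.map_append, List.map_cons]
  have hshape :
      LA.flatMap (fun a => (RA ++ rv :: RB).map (fun b => (a, b)))
          ++ (RA.map (fun b => (lv, b)) ++ (lv, rv) :: RB.map (fun b => (lv, b))
              ++ LB.flatMap (fun a => (RA ++ rv :: RB).map (fun b => (a, b))))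
        = (LA.flatMap (fun a => (RA ++ rv :: RB).map (fun b => (a, b)))
            ++ RA.map (fun b => (lv, b)))
          ++ (lv, rv) :: (RB.map (fun b => (lv, b))
            ++ LB.flatMap (fun a => (RA ++ rv :: RB).map (fun b => (a, b)))) := by
    simp [List.append_assoc]
  rw [hshape]
  apply pv_min?_append
  · intro y hy
    rcases List.mem_append.mp hy with hy | hy
    · obtain ⟨a, ha, hyin⟩ := List.mem_flatMap.mp hy
      obtain ⟨b, hb, rfl⟩ := List.mem_map.mp hyin
      exact h1 a ha b hb
    · obtain ⟨b, hb, rfl⟩ := List.mem_map.mp hy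
      exact h2 b hb
  · intro y hy
    rcases List.mem_append.mp hy with hy | hy
    · obtain ⟨b, hb, rfl⟩ := List.mem_map.mp hy
      exact h3 b hb
    · obtain ⟨a, ha, hyin⟩ := List.mem_flatMap.mp hy
      obtain ⟨b, hb, rfl⟩ := List.mem_map.mp hyin
      exact h4 a ha b hb

-- how Python compares the (d, i, j) tuples, componentwise
theorem pvKey_lt_iff (a b : Int × Int × Int) :
    pvKey a < pvKey b ↔
      a.1 < b.1 ∨ (a.1 = b.1 ∧ (a.2.1 < b.2.1 ∨ (a.2.1 = b.2.1 ∧ a.2.2 < b.2.2))) := by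
  simp [pvKey, Prod.Lex.lt_iff]

theorem pvKey_injective : Function.Injective pvKey := by
  intro a b h
  simp only [pvKey, toLex_inj, Prod.ext_iff] at h
  exact Prod.ext h.1 (Prod.ext h.2.1 h.2.2)

-- the main invariant: scanning the still-unscanned (strictly key-sorted) candidate
-- suffix c with used-sets uL, uR computes exactly A's loop on the remaining lists
theorem pv_scan_loop (l r : List (Int × Int)) :
    ∀ (c : List (Int × Int × Int)) (uL uR : List Int) (acc : List ((Int × Int) × (Int × Int))),
    c.Pairwise (fun a b => pvKey a < pvKey b) →
    (∀ t ∈ c, ∃ (i j : Nat) (hi : i < l.length) (hj : j < r.length),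
        t = (pvDist l[i] r[j], ((i : Int), (j : Int)))) →
    (∀ (i j : Nat) (hi : i < l.length) (hj : j < r.length),
        uL.contains (i : Int) = false → uR.contains (j : Int) = false →
        (pvDist l[i] r[j], ((i : Int), (j : Int))) ∈ c) →
    pvScanB l r c uL uR acc
      = pvLoopA ((pvEnumRem l uL 0).map (·.2)) ((pvEnumRem r uR 0).map (·.2)) acc := by
  intro c
  induction c with
  | nil =>
    intro uL uR acc hsort hsub hall
    have hno : ¬(0 < ((pvEnumRem l uL 0).map (·.2)).length
        ∧ 0 < ((pvEnumRem r uR 0).map (·.2)).length) := by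
      rintro ⟨hL, hR⟩
      simp only [List.length_map] at hL hR
      obtain ⟨p, hp⟩ := List.exists_mem_of_length_pos hL
      obtain ⟨q, hq⟩ := List.exists_mem_of_length_pos hR
      obtain ⟨i, hi, -, -, hci⟩ := (pvEnumRem_mem uL p l 0).mp hp
      obtain ⟨j, hj, -, -, hcj⟩ := (pvEnumRem_mem uR q r 0).mp hq
      simp only [zero_add] at hci hcj
      exact absurd (hall i j hi hj hci hcj) (List.not_mem_nil)
    rw [pvScanB, pvLoopA, dif_neg hno]
  | cons t c' ih =>
    intro uL uR acc hsort hsub hall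
    obtain ⟨i0, j0, hi0, hj0, rfl⟩ := hsub t (List.mem_cons_self ..)
    by_cases hcl : uL.contains (i0 : Int)
    case pos =>
      rw [pvScanB]
      simp only [PySem.Set.contains, hcl, Bool.not_true, Bool.false_and, Bool.false_eq_true,
        if_neg, not_false_iff]
      refine ih uL uR acc hsort.of_cons (fun t ht => hsub t (List.mem_cons_of_mem _ ht)) ?_
      intro i j hi hj hci hcj
      rcases List.mem_cons.mp (hall i j hi hj hci hcj) with heq | hmem
      · exfalso
        have : (i : Int) = (i0 : Int) := congrArg (fun t => t.2.1) heq
        have : i = i0 := by exact_mod_cast this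
        subst this
        rw [hcl] at hci
        exact Bool.noConfusion hci
      · exact hmem
    case neg =>
      by_cases hcr : uR.contains (j0 : Int)
      case pos =>
        rw [pvScanB]
        simp only [PySem.Set.contains, hcr, Bool.not_true, Bool.and_false, Bool.false_eq_true,
          if_neg, not_false_iff]
        refine ih uL uR acc hsort.of_cons (fun t ht => hsub t (List.mem_cons_of_mem _ ht)) ?_
        intro i j hi hj hci hcj
        rcases List.mem_cons.mp (hall i j hi hj hci hcj) with heq | hmem
        · exfalso
          have : (j : Int) = (j0 : Int) := congrArg (fun t => t.2.2) heq
          have : j = j0 := by exact_mod_cast this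
          subst this
          rw [hcr] at hcj
          exact Bool.noConfusion hcj
        · exact hmem
      case neg =>
        have hcl' : uL.contains ((i0 : Nat) : Int) = false := by simpa using hcl
        have hcr' : uR.contains ((j0 : Nat) : Int) = false := by simpa using hcr
        have Hle : ∀ (i j : Nat) (hi : i < l.length) (hj : j < r.length),
            uL.contains (i : Int) = false → uR.contains (j : Int) = false →
            pvDist l[i0] r[j0] ≤ pvDist l[i] r[j] := by
          intro i j hi hj hci hcj
          rcases List.mem_cons.mp (hall i j hi hj hci hcj) with heq | hmem
          · exact le_of_eq (congrArg Prod.fst heq).symm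
          · have hlt := (List.pairwise_cons.mp hsort).1 _ hmem
            rw [pvKey_lt_iff] at hlt
            rcases hlt with h | ⟨h, -⟩
            · exact le_of_lt h
            · exact le_of_eq h
        have Hlt : ∀ (i j : Nat) (hi : i < l.length) (hj : j < r.length),
            uL.contains (i : Int) = false → uR.contains (j : Int) = false →
            (i < i0 ∨ (i = i0 ∧ j < j0)) →
            pvDist l[i0] r[j0] < pvDist l[i] r[j] := by
          intro i j hi hj hci hcj hstrict
          rcases List.mem_cons.mp (hall i j hi hj hci hcj) with heq | hmem
          · exfalso
            have h1 : ((i : Nat) : Int) = ((i0 : Nat) : Int) := congrArg (fun t => t.2.1) heq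
            have h2 : ((j : Nat) : Int) = ((j0 : Nat) : Int) := congrArg (fun t => t.2.2) heq
            have : i = i0 := by exact_mod_cast h1
            have : j = j0 := by exact_mod_cast h2
            omega
          · have hlt := (List.pairwise_cons.mp hsort).1 _ hmem
            rw [pvKey_lt_iff] at hlt
            rcases hlt with h | ⟨h, hrest⟩
            · exact h
            · exfalso
              simp only at hrest
              rcases hrest with h3 | ⟨h3, h4⟩
              · have : (i0 : Int) < (i : Int) := h3
                omega
              · have h3' : ((i0 : Nat) : Int) = ((i : Nat) : Int) := h3
                have h4' : ((j0 : Nat) : Int) < ((j : Nat) : Int) := h4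
                omega
        -- split the two remainder lists at the chosen indices
        have hmemL : (((i0 : Nat) : Int), l[i0]) ∈ pvEnumRem l uL 0 := by
          rw [pvEnumRem_mem]
          exact ⟨i0, hi0, by simp, by simp, by simpa using hcl'⟩
        have hmemR : (((j0 : Nat) : Int), r[j0]) ∈ pvEnumRem r uR 0 := by
          rw [pvEnumRem_mem]
          exact ⟨j0, hj0, by simp, by simp, by simpa using hcr'⟩
        obtain ⟨AL, BL, hEL⟩ := List.append_of_mem hmemL
        obtain ⟨AR, BR, hER⟩ := List.append_of_mem hmemR
        have hpwL := pvEnumRem_pairwise uL l 0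
        rw [hEL, List.pairwise_append] at hpwL
        have hpwR := pvEnumRem_pairwise uR r 0
        rw [hER, List.pairwise_append] at hpwR
        have hALlt : ∀ p ∈ AL, p.1 < ((i0 : Nat) : Int) := by
          intro p hp
          simpa using hpwL.2.2 p hp _ (List.mem_cons_self ..)
        have hBLgt : ∀ p ∈ BL, ((i0 : Nat) : Int) < p.1 :=
          (List.pairwise_cons.mp hpwL.2.1).1
        have hARlt : ∀ p ∈ AR, p.1 < ((j0 : Nat) : Int) := by
          intro p hp
          simpa using hpwR.2.2 p hp _ (List.mem_cons_self ..)
        have hBRgt : ∀ p ∈ BR, ((j0 : Nat) : Int) < p.1 :=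
          (List.pairwise_cons.mp hpwR.2.1).1
        -- what the elements of the remainder lists are
        have hELdesc : ∀ p ∈ pvEnumRem l uL 0,
            ∃ (k : Nat), ∃ (hk : k < l.length), p = (((k : Nat) : Int), l[k]) ∧ uL.contains ((k : Nat) : Int) = false := by
          intro p hp
          obtain ⟨k, hk, h1, h2, h3⟩ := (pvEnumRem_mem uL p l 0).mp hp
          refine ⟨k, hk, ?_, by simpa using h3⟩
          obtain ⟨p1, p2⟩ := p
          simp only at h1 h2
          simp [h1, h2]
        have hERdesc : ∀ p ∈ pvEnumRem r uR 0,
            ∃ (k : Nat), ∃ (hk : k < r.length), p = (((k : Nat) : Int), r[k]) ∧ uR.contains ((k : Nat) : Int) = false := by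
          intro p hp
          obtain ⟨k, hk, h1, h2, h3⟩ := (pvEnumRem_mem uR p r 0).mp hp
          refine ⟨k, hk, ?_, by simpa using h3⟩
          obtain ⟨p1, p2⟩ := p
          simp only at h1 h2
          simp [h1, h2]
        have hALdesc : ∀ p ∈ AL, ∃ (k : Nat), ∃ (hk : k < l.length),
            p = (((k : Nat) : Int), l[k]) ∧ uL.contains ((k : Nat) : Int) = false ∧ k < i0 := by
          intro p hp
          have hpE : p ∈ pvEnumRem l uL 0 := by rw [hEL]; exact List.mem_append.mpr (Or.inl hp)
          obtain ⟨k, hk, hpk, hc⟩ := hELdesc p hpE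
          refine ⟨k, hk, hpk, hc, ?_⟩
          have := hALlt p hp
          rw [hpk] at this
          simp only at this
          exact_mod_cast this
        have hARdesc : ∀ p ∈ AR, ∃ (k : Nat), ∃ (hk : k < r.length),
            p = (((k : Nat) : Int), r[k]) ∧ uR.contains ((k : Nat) : Int) = false ∧ k < j0 := by
          intro p hp
          have hpE : p ∈ pvEnumRem r uR 0 := by rw [hER]; exact List.mem_append.mpr (Or.inl hp)
          obtain ⟨k, hk, hpk, hc⟩ := hERdesc p hpE
          refine ⟨k, hk, hpk, hc, ?_⟩
          have := hARlt p hp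
          rw [hpk] at this
          simp only at this
          exact_mod_cast this
        have hLmapEq : (pvEnumRem l uL 0).map (·.2) = AL.map (·.2) ++ l[i0] :: BL.map (·.2) := by
          rw [hEL]; simp
        have hRmapEq : (pvEnumRem r uR 0).map (·.2) = AR.map (·.2) ++ r[j0] :: BR.map (·.2) := by
          rw [hER]; simp
        -- the distance-minimal pair of the remaining product is the head's pair
        have hminP : PySem.List.min?
            (((pvEnumRem l uL 0).map (·.2)).flatMap
              (fun a => ((pvEnumRem r uR 0).map (·.2)).map (fun b => (a, b))))
            (fun p => (p.1.1 - p.2.1) ^ 2 + (p.1.2 - p.2.2) ^ 2) = some (l[i0], r[j0]) := by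
          rw [hLmapEq, hRmapEq]
          apply pv_min?_product
          · intro a ha b hb
            obtain ⟨p, hp, rfl⟩ := List.mem_map.mp ha
            obtain ⟨k, hk, hpk, hck, hklt⟩ := hALdesc p hp
            have hbE : ∃ q ∈ pvEnumRem r uR 0, q.2 = b := by
              rw [hER]
              rcases List.mem_append.mp hb with hb | hb
              · obtain ⟨q, hq, rfl⟩ := List.mem_map.mp hb
                exact ⟨q, List.mem_append.mpr (Or.inl hq), rfl⟩
              · rcases List.mem_cons.mp hb with rfl | hb
                · exact ⟨((j0 : Int), r[j0]), List.mem_append.mpr (Or.inr (List.mem_cons_self ..)), rfl⟩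
                · obtain ⟨q, hq, rfl⟩ := List.mem_map.mp hb
                  exact ⟨q, List.mem_append.mpr (Or.inr (List.mem_cons_of_mem _ hq)), rfl⟩
            obtain ⟨q, hqE, rfl⟩ := hbE
            obtain ⟨k', hk', hqk, hck'⟩ := hERdesc q hqE
            rw [hpk, hqk]
            exact Hlt k k' hk hk' hck hck' (Or.inl hklt)
          · intro b hb
            obtain ⟨q, hq, rfl⟩ := List.mem_map.mp hb
            have hqE : q ∈ pvEnumRem r uR 0 := by
              rw [hER]; exact List.mem_append.mpr (Or.inl hq)
            obtain ⟨k', hk', hqk, hck', hklt⟩ := hARdesc q hq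
            rw [hqk]
            exact Hlt i0 k' hi0 hk' hcl' hck' (Or.inr ⟨rfl, hklt⟩)
          · intro b hb
            obtain ⟨q, hq, rfl⟩ := List.mem_map.mp hb
            have hqE : q ∈ pvEnumRem r uR 0 := by
              rw [hER]; exact List.mem_append.mpr (Or.inr (List.mem_cons_of_mem _ hq))
            obtain ⟨k', hk', hqk, hck'⟩ := hERdesc q hqE
            rw [hqk]
            exact Hle i0 k' hi0 hk' hcl' hck'
          · intro a ha b hb
            obtain ⟨p, hp, rfl⟩ := List.mem_map.mp ha
            have hpE : p ∈ pvEnumRem l uL 0 := by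
              rw [hEL]; exact List.mem_append.mpr (Or.inr (List.mem_cons_of_mem _ hp))
            obtain ⟨k, hk, hpk, hck⟩ := hELdesc p hpE
            have hbE : ∃ q ∈ pvEnumRem r uR 0, q.2 = b := by
              rw [hER]
              rcases List.mem_append.mp hb with hb | hb
              · obtain ⟨q, hq, rfl⟩ := List.mem_map.mp hb
                exact ⟨q, List.mem_append.mpr (Or.inl hq), rfl⟩
              · rcases List.mem_cons.mp hb with rfl | hb
                · exact ⟨((j0 : Int), r[j0]), List.mem_append.mpr (Or.inr (List.mem_cons_self ..)), rfl⟩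
                · obtain ⟨q, hq, rfl⟩ := List.mem_map.mp hb
                  exact ⟨q, List.mem_append.mpr (Or.inr (List.mem_cons_of_mem _ hq)), rfl⟩
            obtain ⟨q, hqE, rfl⟩ := hbE
            obtain ⟨k', hk', hqk, hck'⟩ := hERdesc q hqE
            rw [hpk, hqk]
            exact Hle k k' hk hk' hck hck'
        -- removing the chosen values removes exactly the chosen indices
        have hremL : PySem.List.remove? ((pvEnumRem l uL 0).map (·.2)) l[i0]
            = some (AL.map (·.2) ++ BL.map (·.2)) := by
          rw [hLmapEq]
          apply pv_remove_first
          intro a ha hav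
          obtain ⟨p, hp, rfl⟩ := List.mem_map.mp ha
          obtain ⟨k, hk, hpk, hck, hklt⟩ := hALdesc p hp
          have hval : l[k] = l[i0] := by rw [hpk] at hav; exact hav
          have := Hlt k j0 hk hj0 hck hcr' (Or.inl hklt)
          rw [show pvDist l[k] r[j0] = pvDist l[i0] r[j0] by rw [hval]] at this
          exact lt_irrefl _ this
        have hremR : PySem.List.remove? ((pvEnumRem r uR 0).map (·.2)) r[j0]
            = some (AR.map (·.2) ++ BR.map (·.2)) := by
          rw [hRmapEq]
          apply pv_remove_first
          intro a ha hav
          obtain ⟨p, hp, rfl⟩ := List.mem_map.mp ha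
          obtain ⟨k', hk', hpk, hck', hklt⟩ := hARdesc p hp
          have hval : r[k'] = r[j0] := by rw [hpk] at hav; exact hav
          have := Hlt i0 k' hi0 hk' hcl' hck' (Or.inr ⟨rfl, hklt⟩)
          rw [show pvDist l[i0] r[k'] = pvDist l[i0] r[j0] by rw [hval]] at this
          exact lt_irrefl _ this
        -- the remainder lists after marking the chosen indices used
        have hnewL : (pvEnumRem l (uL ++ [((i0 : Nat) : Int)]) 0).map (·.2)
            = AL.map (·.2) ++ BL.map (·.2) := by
          rw [pvEnumRem_snoc, hEL, List.filter_append, List.filter_cons]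
          have h1 : AL.filter (fun p => p.1 != ((i0 : Nat) : Int)) = AL :=
            List.filter_eq_self.mpr (fun p hp => by have := hALlt p hp; simp; omega)
          have h2 : BL.filter (fun p => p.1 != ((i0 : Nat) : Int)) = BL :=
            List.filter_eq_self.mpr (fun p hp => by have := hBLgt p hp; simp; omega)
          rw [h1, h2]
          simp
        have hnewR : (pvEnumRem r (uR ++ [((j0 : Nat) : Int)]) 0).map (·.2)
            = AR.map (·.2) ++ BR.map (·.2) := by
          rw [pvEnumRem_snoc, hER, List.filter_append, List.filter_cons]
          have h1 : AR.filter (fun p => p.1 != ((j0 : Nat) : Int)) = AR :=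
            List.filter_eq_self.mpr (fun p hp => by have := hARlt p hp; simp; omega)
          have h2 : BR.filter (fun p => p.1 != ((j0 : Nat) : Int)) = BR :=
            List.filter_eq_self.mpr (fun p hp => by have := hBRgt p hp; simp; omega)
          rw [h1, h2]
          simp
        have haddL : PySem.Set.add uL ((i0 : Nat) : Int) = uL ++ [((i0 : Nat) : Int)] := by
          simp only [PySem.Set.add, PySem.Set.contains, hcl', Bool.false_eq_true, if_false]
        have haddR : PySem.Set.add uR ((j0 : Nat) : Int) = uR ++ [((j0 : Nat) : Int)] := by
          simp only [PySem.Set.add, PySem.Set.contains, hcr', Bool.false_eq_true, if_false]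
        have hgetL : PySem.List.pyGetD l ((i0 : Nat) : Int) ((0 : Int), (0 : Int)) = l[i0] := by
          rw [PySem.List.pyGetD_natCast]
          exact List.getD_eq_getElem l _ hi0
        have hgetR : PySem.List.pyGetD r ((j0 : Nat) : Int) ((0 : Int), (0 : Int)) = r[j0] := by
          rw [PySem.List.pyGetD_natCast]
          exact List.getD_eq_getElem r _ hj0
        have hposL : 0 < ((pvEnumRem l uL 0).map (·.2)).length := by
          rw [hLmapEq]; simp
        have hposR : 0 < ((pvEnumRem r uR 0).map (·.2)).length := by
          rw [hRmapEq]; simp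
        -- one step of the scan …
        rw [pvScanB]
        simp only [PySem.Set.contains, hcl', hcr', Bool.not_false, Bool.and_self, if_true]
        rw [hgetL, hgetR, haddL, haddR]
        -- … matches one step of the loop
        have hminPair : pvMinPair ((pvEnumRem l uL 0).map (·.2)) ((pvEnumRem r uR 0).map (·.2))
            = (l[i0], r[j0]) := by
          rw [pvMinPair, hminP, Option.getD_some]
        rw [pvLoopA, dif_pos ⟨hposL, hposR⟩, hminPair]
        simp only
        rw [hremL, hremR, Option.getD_some, Option.getD_some]
        rw [← hnewL, ← hnewR]
        apply ih
        · exact hsort.of_cons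
        · exact fun t ht => hsub t (List.mem_cons_of_mem _ ht)
        · intro i j hi hj hci hcj
          have hci' : uL.contains (i : Int) = false ∧ ((i : Nat) : Int) ≠ ((i0 : Nat) : Int) := by
            simp only [List.contains_append] at hci
            obtain ⟨h1, h2⟩ := Bool.or_eq_false_iff.mp hci
            exact ⟨h1, by simpa using h2⟩
          have hcj' : uR.contains (j : Int) = false ∧ ((j : Nat) : Int) ≠ ((j0 : Nat) : Int) := by
            simp only [List.contains_append] at hcj
            obtain ⟨h1, h2⟩ := Bool.or_eq_false_iff.mp hcj
            exact ⟨h1, by simpa using h2⟩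
          rcases List.mem_cons.mp (hall i j hi hj hci'.1 hcj'.1) with heq | hmem
          · exact absurd (congrArg (fun t => t.2.1) heq) hci'.2
          · exact hmem

theorem pvCand_mem (l r : List (Int × Int)) (t : Int × Int × Int) :
    t ∈ pvCand l r ↔ ∃ (i j : Nat) (hi : i < l.length) (hj : j < r.length),
      t = (pvDist l[i] r[j], ((i : Int), (j : Int))) := by
  constructor
  · intro ht
    obtain ⟨ic, hic, htin⟩ := List.mem_flatMap.mp ht
    obtain ⟨jc, hjc, rfl⟩ := List.mem_map.mp htin
    obtain ⟨i, hi, rfl⟩ := (PySem.List.mem_enumerate_iff l 0 ic).mp hic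
    obtain ⟨j, hj, rfl⟩ := (PySem.List.mem_enumerate_iff r 0 jc).mp hjc
    exact ⟨i, j, hi, hj, by simp⟩
  · rintro ⟨i, j, hi, hj, rfl⟩
    refine List.mem_flatMap.mpr ⟨((i : Int), l[i]), ?_, ?_⟩
    · exact (PySem.List.mem_enumerate_iff l 0 _).mpr ⟨i, hi, by simp⟩
    · refine List.mem_map.mpr ⟨((j : Int), r[j]), ?_, rfl⟩
      exact (PySem.List.mem_enumerate_iff r 0 _).mpr ⟨j, hj, by simp⟩

theorem pvCand_nodup (l r : List (Int × Int)) : (pvCand l r).Nodup := by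
  rw [pvCand, List.nodup_flatMap]
  constructor
  · intro ic _
    refine (PySem.List.pairwise_lt_enumerate r 0).map _ ?_
    intro a b hab heq
    have := congrArg (fun t => t.2.2) heq
    simp only at this
    omega
  · refine (PySem.List.pairwise_lt_enumerate l 0).imp ?_
    intro a b hab x hx1 hx2
    obtain ⟨jc1, -, rfl⟩ := List.mem_map.mp hx1
    obtain ⟨jc2, -, heq⟩ := List.mem_map.mp hx2
    have := congrArg (fun t => t.2.1) heq
    simp only at this
    omega

theorem pv_sorted_strict (l r : List (Int × Int)) :
    (PySem.List.sorted (pvCand l r) pvKey).Pairwise (fun a b => pvKey a < pvKey b) := by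
  have hperm := PySem.List.sorted_perm (pvCand l r) pvKey false
  have hle := PySem.List.sorted_pairwise (pvCand l r) pvKey
  have hnodup : ((PySem.List.sorted (pvCand l r) pvKey).map pvKey).Nodup :=
    (List.Perm.nodup_iff (hperm.map pvKey)).mpr ((pvCand_nodup l r).map pvKey_injective)
  have hne : (PySem.List.sorted (pvCand l r) pvKey).Pairwise (fun a b => pvKey a ≠ pvKey b) :=
    List.pairwise_map.mp hnodup
  exact (hle.and hne).imp (fun h => lt_of_le_of_ne h.1 h.2)

theorem pv_main (l r : List (Int × Int)) :
    generate_centroid_pairs l r = generate_centroid_pairs_alt l r := by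
  rw [generate_centroid_pairs, generate_centroid_pairs_alt]
  rw [pv_scan_loop l r (PySem.List.sorted (pvCand l r) pvKey) PySem.Set.empty PySem.Set.empty []
    (pv_sorted_strict l r)
    (fun t ht => (pvCand_mem l r t).mp ((PySem.List.mem_sorted _ _ _ t).mp ht))
    (fun i j hi hj _ _ => (PySem.List.mem_sorted _ _ _ _).mpr
      ((pvCand_mem l r _).mpr ⟨i, j, hi, hj, rfl⟩))]
  show pvLoopA l r [] = pvLoopA ((pvEnumRem l [] 0).map (·.2)) ((pvEnumRem r [] 0).map (·.2)) []
  rw [pvEnumRem_nil_used, pvEnumRem_nil_used]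

-- ===== VERDICT (by name: the statement is the Claim_ definition above) =====
theorem generate_centroid_pairs_spec : Claim_equal_generate_centroid_pairs := by
  intro l r _
  unfold Spec_generate_centroid_pairs
  exact pv_main l r
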